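-- pv_equiv track=rewrite | github.com/google-research/google-research | hyperbolic/utils/popchoice.py | sorted_by_degrees
-- ===== SOURCE A (Python) =====
-- def sorted_by_degrees(item_to_deg):
--   """Sorts items from highest degree to lowest."""
--   deg_to_item = {}
--   for item in item_to_deg:
--     deg = item_to_deg[item]
--     if deg in deg_to_item:
--       deg_to_item[deg].append(item)
--     else:
--       deg_to_item[deg] = [item]
--   return sorted(deg_to_item.items(), reverse=True)
-- ===== SOURCE B (Python) =====
-- def sorted_by_degrees(item_to_deg):
--   """Sorts items from highest degree to lowest."""
--   pairs = sorted(item_to_deg.items(), key=lambda kv: kv[1], reverse=True)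
--   out = []
--   for item, deg in pairs:
--     if out and out[-1][0] == deg:
--       out[-1][1].append(item)
--     else:
--       out.append((deg, [item]))
--   return out
-- ===== Notes on version B (the rewrite author's own statement) =====
-- stated objective: alternative
-- what changed: B replaces A's dict-of-lists grouping followed by a sort of the (degree, items) entries with a single stable descending sort of the (item, degree) pairs followed by one run-merging scan that builds the groups.
import Mathlib
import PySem

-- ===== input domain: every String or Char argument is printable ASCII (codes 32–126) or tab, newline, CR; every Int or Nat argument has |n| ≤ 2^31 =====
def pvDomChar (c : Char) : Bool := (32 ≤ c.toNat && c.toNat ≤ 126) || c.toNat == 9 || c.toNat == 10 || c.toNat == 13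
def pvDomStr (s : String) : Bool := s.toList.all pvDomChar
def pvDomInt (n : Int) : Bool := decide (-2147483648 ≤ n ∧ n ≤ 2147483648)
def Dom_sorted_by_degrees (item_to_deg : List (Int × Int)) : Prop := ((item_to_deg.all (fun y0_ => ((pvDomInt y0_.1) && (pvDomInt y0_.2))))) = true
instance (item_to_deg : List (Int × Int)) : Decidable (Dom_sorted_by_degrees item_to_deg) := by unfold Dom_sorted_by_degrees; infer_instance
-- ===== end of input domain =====

-- B builds the grouping by a stable descending sort of the (item, degree) pairs followed by a
-- single run-merging scan, instead of A's dict-of-lists grouping followed by a sort of the items.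
-- Objective: alternative decomposition (same asymptotic cost). The proof is about return values only.

-- ===== PORT A =====
def sorted_by_degrees (item_to_deg : List (Int × Int)) : List (Int × List Int) :=
  let deg_to_item : PySem.Dict Int (List Int) :=
    item_to_deg.foldl (fun d kv =>
      if d.contains kv.2 then d.modify kv.2 [] (fun g => g ++ [kv.1])   -- deg_to_item[deg].append(item)
      else d.insert kv.2 [kv.1]) PySem.Dict.empty
  -- sorted(deg_to_item.items(), reverse=True): the dict's keys are distinct, so Python's
  -- lexicographic tuple comparison never reads the second component — key (·.1) is exact here.
  PySem.List.sorted deg_to_item.items (fun kv => kv.1) true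

-- ===== PORT B =====
-- the loop body of B's scan: merge kv into the last group if the degree matches, else open a new group
def stepB (out : List (Int × List Int)) (kv : Int × Int) : List (Int × List Int) :=
  match out.getLast? with
  | some e => if e.1 == kv.2 then out.dropLast ++ [(e.1, e.2 ++ [kv.1])] else out ++ [(kv.2, [kv.1])]
  | none => out ++ [(kv.2, [kv.1])]

def sorted_by_degrees_alt (item_to_deg : List (Int × Int)) : List (Int × List Int) :=
  let pairs := PySem.List.sorted item_to_deg (fun kv => kv.2) true
  pairs.foldl stepB []

-- ===== PRECONDITION & SPEC =====
-- Pre_ requires distinct item keys: the parameter is a Python dict, and an association list with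
-- duplicate keys does not faithfully encode any dict (a dict never holds duplicate keys).
def Pre_sorted_by_degrees (item_to_deg : List (Int × Int)) : Prop :=
  (item_to_deg.map Prod.fst).Nodup
instance (item_to_deg : List (Int × Int)) : Decidable (Pre_sorted_by_degrees item_to_deg) := by unfold Pre_sorted_by_degrees; infer_instance
def pvWitness_sorted_by_degrees : (List (Int × Int)) := [(1, 2), (3, 2), (4, 0), (7, 5)]

def Spec_sorted_by_degrees (item_to_deg : List (Int × Int)) (out : List (Int × List Int)) : Prop := out = sorted_by_degrees_alt item_to_deg
instance (item_to_deg : List (Int × Int)) (out : List (Int × List Int)) : Decidable (Spec_sorted_by_degrees item_to_deg out) := by unfold Spec_sorted_by_degrees; infer_instance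

-- ===== CLAIM (what is proved, stated in full; the proofs are below) =====
def Claim_equal_sorted_by_degrees : Prop := ∀ (item_to_deg : List (Int × Int)), Dom_sorted_by_degrees item_to_deg → Pre_sorted_by_degrees item_to_deg → Spec_sorted_by_degrees item_to_deg (sorted_by_degrees item_to_deg)

-- ===== LEMMAS AND PROOFS =====

-- the distinct degrees of l, highest first
def degsDesc (l : List (Int × Int)) : List Int :=
  PySem.List.sorted (PySem.Set.ofList (l.map (fun kv => kv.2))) (fun x => x) true

-- the items of degree d, in insertion order
def grp (l : List (Int × Int)) (d : Int) : List Int :=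
  (l.filter (fun kv => kv.2 == d)).map (fun kv => kv.1)

-- the common normal form of both programs: degrees descending, each with its items
def canon (l : List (Int × Int)) : List (Int × List Int) :=
  (degsDesc l).map (fun d => (d, grp l d))

-- insertion of a key into a strictly descending list (the shape insertBy produces)
def insDesc (k : Int) : List Int → List Int
  | [] => [k]
  | d :: t => if d < k then k :: d :: t else if k = d then d :: t else d :: insDesc k t

theorem stepA_eq (d : PySem.Dict Int (List Int)) (kv : Int × Int) :
    (if d.contains kv.2 then d.modify kv.2 [] (fun g => g ++ [kv.1])
     else d.insert kv.2 [kv.1]) = d.modify kv.2 [] (fun g => g ++ [kv.1]) := by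
  by_cases h : d.contains kv.2
  · simp [h]
  · simp only [Bool.not_eq_true] at h
    rw [if_neg (by simp [h]), PySem.Dict.modify, PySem.Dict.getD_of_not_contains _ _ h]
    rfl

theorem hfold (l : List (Int × Int)) :
    (l.foldl (fun d kv =>
      if d.contains kv.2 then d.modify kv.2 [] (fun g => g ++ [kv.1])
      else d.insert kv.2 [kv.1]) (PySem.Dict.empty : PySem.Dict Int (List Int)))
      = l.foldl (fun d kv => d.modify kv.2 [] (fun g => g ++ [kv.1])) PySem.Dict.empty :=
  PySem.List.foldl_congr_mem l
    (fun d kv => if d.contains kv.2 then d.modify kv.2 [] (fun g => g ++ [kv.1]) else d.insert kv.2 [kv.1])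
    (fun d kv => d.modify kv.2 [] (fun g => g ++ [kv.1]))
    PySem.Dict.empty (fun d kv _ => stepA_eq d kv)

theorem itemsA_eq (l : List (Int × Int)) :
    (l.foldl (fun d kv =>
      if d.contains kv.2 then d.modify kv.2 [] (fun g => g ++ [kv.1])
      else d.insert kv.2 [kv.1]) (PySem.Dict.empty : PySem.Dict Int (List Int))).items
    = (PySem.Set.ofList (l.map (fun kv => kv.2))).map (fun d => (d, grp l d)) := by
  rw [hfold]
  have hmap : l.foldl (fun d kv => d.modify kv.2 [] (fun g => g ++ [kv.1])) (PySem.Dict.empty : PySem.Dict Int (List Int))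
      = (l.map (fun kv => (kv.2, kv.1))).foldl (fun d p => d.modify p.1 [] (fun g => g ++ [p.2])) PySem.Dict.empty :=
    (List.foldl_map (f := fun kv : Int × Int => (kv.2, kv.1))
      (g := fun (d : PySem.Dict Int (List Int)) (p : Int × Int) => d.modify p.1 [] (fun g => g ++ [p.2]))
      (l := l) (init := PySem.Dict.empty)).symm
  rw [hmap]
  set D := (l.map (fun kv => (kv.2, kv.1))).foldl (fun d p => d.modify p.1 [] (fun g => g ++ [p.2])) (PySem.Dict.empty : PySem.Dict Int (List Int)) with hD
  have hkeys : D.keys = PySem.Set.ofList (l.map (fun kv => kv.2)) := by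
    rw [hD, PySem.Dict.keys_foldl_modify_key (l.map (fun kv => (kv.2, kv.1))) (fun p => p.1) [] (fun _ p g => g ++ [p.2]) PySem.Dict.empty]
    rw [PySem.Dict.keys_empty, PySem.Set.update_nil_left, List.map_map]
    rfl
  have hnd : D.keys.Nodup := by rw [hkeys]; exact PySem.Set.nodup_ofList _
  rw [PySem.Dict.items_eq_map_keys D hnd [], hkeys]
  apply List.map_congr_left
  intro d _
  have hg := PySem.Dict.getD_foldl_modify_append (l.map (fun kv => (kv.2, kv.1))) (PySem.Dict.empty : PySem.Dict Int (List Int)) d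
  rw [← hD] at hg
  rw [hg, PySem.Dict.getD_empty, List.nil_append, List.filter_map, List.map_map, grp]
  rfl

theorem degsDesc_pairwise (l : List (Int × Int)) :
    (degsDesc l).Pairwise (fun a b => b < a) := by
  have h1 := PySem.List.sorted_pairwise_rev (PySem.Set.ofList (l.map (fun kv => kv.2))) (fun x => x)
  have hnd : (degsDesc l).Nodup :=
    (PySem.List.sorted_perm _ _ _).nodup_iff.mpr (PySem.Set.nodup_ofList _)
  exact (h1.and hnd).imp (fun h => lt_of_le_of_ne h.1 (Ne.symm h.2))

theorem sorted_items_eq_canon (l : List (Int × Int)) :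
    PySem.List.sorted ((PySem.Set.ofList (l.map (fun kv => kv.2))).map (fun d => (d, grp l d)))
      (fun kv => kv.1) true = canon l := by
  apply PySem.List.sorted_rev_eq_of_perm_of_pairwise_gt
  · show (canon l).Perm _
    unfold canon degsDesc
    exact List.Perm.map (fun d => (d, grp l d))
      (PySem.List.sorted_perm (PySem.Set.ofList (l.map (fun kv => kv.2))) (fun x => x) true)
  · unfold canon
    rw [List.pairwise_map]
    exact degsDesc_pairwise l

theorem mem_degsDesc (l : List (Int × Int)) (d : Int) :
    d ∈ degsDesc l ↔ ∃ kv ∈ l, kv.2 = d := by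
  unfold degsDesc
  rw [PySem.List.mem_sorted, PySem.Set.mem_ofList, List.mem_map]

theorem insertBy_append_not_before {α : Type} (before : α → α → Bool) (x : α)
    (zs rest : List α) (h : ∀ z ∈ zs, before x z = false) :
    PySem.List.insertBy before x (zs ++ rest) = zs ++ PySem.List.insertBy before x rest := by
  induction zs with
  | nil => simp
  | cons z t ih =>
      simp only [List.cons_append, PySem.List.insertBy]
      rw [h z (by simp)]
      simp only [Bool.false_eq_true, if_false]
      rw [ih (fun z hz => h z (by simp [hz]))]

theorem insertBy_all_before {α : Type} (before : α → α → Bool) (x : α)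
    (zs : List α) (h : ∀ z ∈ zs, before x z = true) :
    PySem.List.insertBy before x zs = x :: zs := by
  cases zs with
  | nil => rfl
  | cons z t => simp [PySem.List.insertBy, h z (by simp)]

theorem insDesc_perm (k : Int) (ds : List Int) (hk : k ∉ ds) : (insDesc k ds).Perm (k :: ds) := by
  induction ds with
  | nil => simp [insDesc]
  | cons d t ih =>
      unfold insDesc
      split_ifs with h1 h2
      · exact List.Perm.refl _
      · exact absurd (h2 ▸ List.mem_cons_self) hk
      · exact (List.Perm.cons d (ih (fun h => hk (List.mem_cons.mpr (Or.inr h))))).trans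
          (List.Perm.swap k d t)

theorem insDesc_of_mem (k : Int) (ds : List Int)
    (hds : ds.Pairwise (fun a b => b < a)) (hk : k ∈ ds) : insDesc k ds = ds := by
  induction ds with
  | nil => cases hk
  | cons d t ih =>
      have hlt := (List.pairwise_cons.mp hds).1
      unfold insDesc
      rcases List.mem_cons.mp hk with h | h
      · subst h; simp
      · have : ¬ d < k := not_lt.mpr (le_of_lt (hlt _ h))
        rw [if_neg this]
        by_cases h2 : k = d
        · rw [if_pos h2]
        · rw [if_neg h2, ih (List.pairwise_cons.mp hds).2 h]

theorem insDesc_pairwise (k : Int) (ds : List Int)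
    (hds : ds.Pairwise (fun a b => b < a)) (hk : k ∉ ds) :
    (insDesc k ds).Pairwise (fun a b => b < a) := by
  induction ds with
  | nil => simp [insDesc]
  | cons d t ih =>
      have hlt := (List.pairwise_cons.mp hds).1
      have ht := (List.pairwise_cons.mp hds).2
      unfold insDesc
      split_ifs with h1 h2
      · exact List.pairwise_cons.mpr ⟨by
          intro e he
          rcases List.mem_cons.mp he with h | h
          · omega
          · exact lt_trans (hlt _ h) h1, hds⟩
      · exact absurd (h2 ▸ List.mem_cons_self) hk
      · have hknt : k ∉ t := fun h => hk (List.mem_cons.mpr (Or.inr h))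
        refine List.pairwise_cons.mpr ⟨?_, ih ht hknt⟩
        intro e he
        have := (insDesc_perm k t hknt).mem_iff.mp he
        rcases List.mem_cons.mp this with h | h
        · omega
        · exact hlt _ h

theorem flatMap_ite_not_mem (ds : List Int) (g : Int → List (Int × Int)) (k : Int)
    (x : Int × Int) (hk : k ∉ ds) :
    ds.flatMap (fun d => g d ++ if d == k then [x] else []) = ds.flatMap g := by
  induction ds with
  | nil => rfl
  | cons d t ih =>
      have hdk : (d == k) = false := by
        simp only [beq_eq_false_iff_ne]; intro h; exact hk (h ▸ List.mem_cons_self)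
      simp only [List.flatMap_cons, hdk, Bool.false_eq_true, if_false, List.append_nil]
      rw [ih (fun h => hk (List.mem_cons.mpr (Or.inr h)))]

theorem insertBy_blocks (x : Int × Int) (ds : List Int) (g : Int → List (Int × Int))
    (hds : ds.Pairwise (fun a b => b < a))
    (hg : ∀ d ∈ ds, g d ≠ [] ∧ ∀ y ∈ g d, y.2 = d)
    (hk : x.2 ∉ ds → g x.2 = []) :
    PySem.List.insertBy (fun a b => decide (b.2 < a.2)) x (ds.flatMap g)
      = (insDesc x.2 ds).flatMap (fun d => g d ++ if d == x.2 then [x] else []) := by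
  induction ds with
  | nil =>
      simp only [List.flatMap_nil, insDesc, List.flatMap_cons, List.flatMap_nil, List.append_nil]
      rw [hk (by simp), beq_self_eq_true, if_pos rfl]
      rfl
  | cons d t ih =>
      have hlt := (List.pairwise_cons.mp hds).1
      have ht := (List.pairwise_cons.mp hds).2
      have hgd := hg d List.mem_cons_self
      unfold insDesc
      by_cases h1 : d < x.2
      · -- x goes in front of everything
        rw [if_pos h1]
        have hnm : x.2 ∉ d :: t := by
          intro h
          rcases List.mem_cons.mp h with h | h
          · omega
          · have := hlt _ h; omega
        obtain ⟨y, ys, hys⟩ := List.exists_cons_of_ne_nil hgd.1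
        have hy2 : y.2 = d := hgd.2 y (hys ▸ List.mem_cons_self)
        simp only [List.flatMap_cons]
        rw [hk hnm, hys]
        have hbef : (decide (y.2 < x.2)) = true := by simp [hy2, h1]
        simp only [List.cons_append, PySem.List.insertBy, hbef, if_pos]
        have hnt : x.2 ∉ t := fun h => hnm (List.mem_cons.mpr (Or.inr h))
        have hdx : (d == x.2) = false := by simp only [beq_eq_false_iff_ne]; omega
        rw [flatMap_ite_not_mem t g x.2 x hnt]
        simp [hdx]
      · rw [if_neg h1]
        by_cases h2 : x.2 = d
        · -- x appended at the end of block d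
          rw [if_pos h2]
          simp only [List.flatMap_cons]
          rw [insertBy_append_not_before _ _ _ _ (by
            intro z hz
            have := hgd.2 z hz
            simp only [decide_eq_false_iff_not, not_lt]
            omega)]
          rw [insertBy_all_before _ _ _ (by
            intro z hz
            obtain ⟨e, he, hze⟩ := List.mem_flatMap.mp hz
            have h3 := (hg e (List.mem_cons.mpr (Or.inr he))).2 z hze
            have h4 := hlt e he
            simp only [decide_eq_true_eq]
            omega)]
          have hdx : (d == x.2) = true := by simp [h2]
          have hnt : x.2 ∉ t := by
            intro h; have := hlt _ h; omega
          rw [flatMap_ite_not_mem _ _ _ _ hnt, hdx]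
          simp
        · -- x goes further right
          have h3 : x.2 < d := by omega
          rw [if_neg h2]
          simp only [List.flatMap_cons]
          rw [insertBy_append_not_before _ _ _ _ (by
            intro z hz
            have := hgd.2 z hz
            simp only [decide_eq_false_iff_not, not_lt]
            omega)]
          rw [ih ht (fun e he => hg e (List.mem_cons.mpr (Or.inr he)))
            (fun hne => hk (by
              intro h
              rcases List.mem_cons.mp h with h | h
              · omega
              · exact hne h))]
          have hdx : (d == x.2) = false := by
            simp only [beq_eq_false_iff_ne]; omega
          rw [hdx]
          simp

theorem degsDesc_snoc (l : List (Int × Int)) (x : Int × Int) :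
    degsDesc (l ++ [x]) = insDesc x.2 (degsDesc l) := by
  have h1 : degsDesc (l ++ [x])
      = PySem.List.sorted (PySem.Set.add (PySem.Set.ofList (l.map (fun kv => kv.2))) x.2) (fun x => x) true := by
    unfold degsDesc
    rw [List.map_append, List.map_cons, List.map_nil, PySem.Set.ofList_append_singleton]
  rw [h1]
  by_cases hm : x.2 ∈ PySem.Set.ofList (l.map (fun kv => kv.2))
  · rw [PySem.Set.add_of_mem hm]
    have hmem : x.2 ∈ degsDesc l := by
      unfold degsDesc; rw [PySem.List.mem_sorted]; exact hm
    have h2 : PySem.List.sorted (PySem.Set.ofList (l.map (fun kv => kv.2))) (fun x => x) true = degsDesc l := rfl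
    rw [h2]
    exact (insDesc_of_mem _ _ (degsDesc_pairwise l) hmem).symm
  · rw [PySem.Set.add_of_not_mem hm]
    have hnm : x.2 ∉ degsDesc l := by
      unfold degsDesc; rw [PySem.List.mem_sorted]; exact hm
    apply PySem.List.sorted_rev_eq_of_perm_of_pairwise_gt
    · refine (insDesc_perm _ _ hnm).trans ?_
      refine (List.Perm.cons x.2 ?_).trans (List.perm_append_singleton x.2 _).symm
      exact PySem.List.sorted_perm _ _ _
    · exact insDesc_pairwise _ _ (degsDesc_pairwise l) hnm

theorem sorted_eq_blocks (l : List (Int × Int)) :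
    PySem.List.sorted l (fun kv => kv.2) true
    = (degsDesc l).flatMap (fun d => l.filter (fun kv => kv.2 == d)) := by
  induction l using List.reverseRecOn with
  | nil => rfl
  | append_singleton l x ih =>
      have ih' := ih
      rw [PySem.List.sorted_rev_eq_foldl_insertBy] at ih'
      rw [PySem.List.sorted_rev_eq_foldl_insertBy, List.foldl_append, List.foldl_cons,
        List.foldl_nil, ih']
      have hgOK : ∀ d ∈ degsDesc l, l.filter (fun kv => kv.2 == d) ≠ [] ∧
          ∀ y ∈ l.filter (fun kv => kv.2 == d), y.2 = d := by
        intro d hd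
        obtain ⟨kv, hkv, hkv2⟩ := (mem_degsDesc l d).mp hd
        constructor
        · intro hnil
          have hmem : kv ∈ l.filter (fun kv => kv.2 == d) :=
            List.mem_filter.mpr ⟨hkv, by simp [hkv2]⟩
          rw [hnil] at hmem; cases hmem
        · intro y hy
          have := List.mem_filter.mp hy
          simpa using this.2
      have hkOK : x.2 ∉ degsDesc l → l.filter (fun kv => kv.2 == x.2) = [] := by
        intro hnm
        rw [List.filter_eq_nil_iff]
        intro kv hkv
        simp only [beq_iff_eq]
        intro h
        exact hnm ((mem_degsDesc l x.2).mpr ⟨kv, hkv, h⟩)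
      rw [insertBy_blocks x (degsDesc l) (fun d => l.filter (fun kv => kv.2 == d))
        (degsDesc_pairwise l) hgOK hkOK]
      rw [degsDesc_snoc]
      have hfun : ∀ d : Int, (l ++ [x]).filter (fun kv => kv.2 == d)
          = l.filter (fun kv => kv.2 == d) ++ if d == x.2 then [x] else [] := by
        intro d
        rw [List.filter_append]
        congr 1
        simp only [List.filter_cons, List.filter_nil]
        have hc : (x.2 == d) = (d == x.2) := by
          by_cases h : x.2 = d
          · simp [h]
          · have h2 : ¬ d = x.2 := fun hh => h hh.symm
            simp [h, h2]
        rw [hc]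
      simp only [hfun]

theorem scan_block (d : Int) (zs : List (Int × Int)) (hzs : ∀ z ∈ zs, z.2 = d)
    (init : List (Int × List Int)) (grpv : List Int) :
    zs.foldl stepB (init ++ [(d, grpv)]) = init ++ [(d, grpv ++ zs.map (fun kv => kv.1))] := by
  induction zs generalizing grpv with
  | nil => simp
  | cons z t ih =>
      rw [List.foldl_cons]
      have hz2 : z.2 = d := hzs z List.mem_cons_self
      have hstep : stepB (init ++ [(d, grpv)]) z = init ++ [(d, grpv ++ [z.1])] := by
        unfold stepB
        rw [List.getLast?_concat]
        simp only [hz2, beq_self_eq_true, if_pos, List.dropLast_concat]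
      rw [hstep, ih (fun z hz => hzs z (List.mem_cons.mpr (Or.inr hz))) (grpv ++ [z.1])]
      simp

theorem scan_blocks (ds : List Int) (g : Int → List (Int × Int))
    (hds : ds.Pairwise (fun a b => b < a))
    (hg : ∀ d ∈ ds, g d ≠ [] ∧ ∀ y ∈ g d, y.2 = d) :
    ∀ init : List (Int × List Int), (∀ e, init.getLast? = some e → e.1 ∉ ds) →
    (ds.flatMap g).foldl stepB init = init ++ ds.map (fun d => (d, (g d).map (fun kv => kv.1))) := by
  induction ds with
  | nil => intro init _; simp
  | cons d t ih =>
      intro init hinit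
      have hlt := (List.pairwise_cons.mp hds).1
      have ht := (List.pairwise_cons.mp hds).2
      have hgd := hg d List.mem_cons_self
      obtain ⟨y, ys, hys⟩ := List.exists_cons_of_ne_nil hgd.1
      have hy2 : y.2 = d := hgd.2 y (hys ▸ List.mem_cons_self)
      rw [List.flatMap_cons, List.foldl_append, hys, List.foldl_cons]
      have hstep : stepB init y = init ++ [(d, [y.1])] := by
        cases hl : init.getLast? with
        | none =>
            unfold stepB
            rw [hl, hy2]
        | some e =>
            have hed : e.1 ≠ d := fun h => hinit e hl (h ▸ List.mem_cons_self)
            have hne : (e.1 == y.2) = false := by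
              simp only [beq_eq_false_iff_ne]; rw [hy2]; exact hed
            unfold stepB
            rw [hl]
            dsimp only
            rw [hne]
            simp [hy2]
      rw [hstep]
      have hys2 : ∀ z ∈ ys, z.2 = d := fun z hz => hgd.2 z (hys ▸ List.mem_cons.mpr (Or.inr hz))
      rw [scan_block d ys hys2 init [y.1]]
      rw [ih ht (fun e he => hg e (List.mem_cons.mpr (Or.inr he)))
        (init ++ [(d, [y.1] ++ ys.map (fun kv => kv.1))])
        (by
          intro e he
          rw [List.getLast?_concat] at he
          cases he
          intro hmem
          have := hlt _ hmem
          omega)]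
      simp [hys]

theorem B_eq_canon (l : List (Int × Int)) : sorted_by_degrees_alt l = canon l := by
  unfold sorted_by_degrees_alt
  rw [sorted_eq_blocks]
  have hgOK : ∀ d ∈ degsDesc l, l.filter (fun kv => kv.2 == d) ≠ [] ∧
      ∀ y ∈ l.filter (fun kv => kv.2 == d), y.2 = d := by
    intro d hd
    obtain ⟨kv, hkv, hkv2⟩ := (mem_degsDesc l d).mp hd
    constructor
    · intro hnil
      have hmem : kv ∈ l.filter (fun kv => kv.2 == d) :=
        List.mem_filter.mpr ⟨hkv, by simp [hkv2]⟩
      rw [hnil] at hmem; cases hmem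
    · intro y hy
      have := List.mem_filter.mp hy
      simpa using this.2
  rw [scan_blocks (degsDesc l) (fun d => l.filter (fun kv => kv.2 == d))
    (degsDesc_pairwise l) hgOK [] (by intro e he; cases he)]
  rw [List.nil_append]
  rfl

theorem A_eq_canon (l : List (Int × Int)) : sorted_by_degrees l = canon l := by
  show PySem.List.sorted
    (l.foldl (fun d kv =>
      if d.contains kv.2 then d.modify kv.2 [] (fun g => g ++ [kv.1])
      else d.insert kv.2 [kv.1]) (PySem.Dict.empty : PySem.Dict Int (List Int))).items
    (fun kv => kv.1) true = canon l
  rw [itemsA_eq]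
  exact sorted_items_eq_canon l

-- ===== VERDICT (by name: the statement is the Claim_ definition above) =====
theorem sorted_by_degrees_spec : Claim_equal_sorted_by_degrees := by
  intro l _ _
  unfold Spec_sorted_by_degrees
  rw [A_eq_canon, B_eq_canon]
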